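-- pv_equiv track=rewrite | github.com/whubsch/atlus_website | backend/app/process.py | combine_consecutive_tuples
-- ===== SOURCE A (Python) =====
-- def combine_consecutive_tuples(
--     tuples_list: list[tuple[str, str]]
-- ) -> list[tuple[str, str]]:
--     """Join adjacent `usaddress` fields."""
--     combined_list = []
--     current_tag = None
--     current_value = None
--
--     for value, tag in tuples_list:
--         if tag != current_tag:
--             if current_tag:
--                 combined_list.append((current_value, current_tag))
--             current_value, current_tag = value, tag
--         else:
--             current_value = " ".join(i for i in [current_value, value] if i)
--
--     if current_tag:
--         combined_list.append((current_value, current_tag))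
--
--     return combined_list
-- ===== SOURCE B (Python) =====
-- def combine_consecutive_tuples(
--     tuples_list: list[tuple[str, str]]
-- ) -> list[tuple[str, str]]:
--     """Join adjacent `usaddress` fields (run-based two-phase rewrite)."""
--     result = []
--     i, n = 0, len(tuples_list)
--     while i < n:
--         tag = tuples_list[i][1]
--         vals = []
--         while i < n and tuples_list[i][1] == tag:
--             if tuples_list[i][0]:
--                 vals.append(tuples_list[i][0])
--             i += 1
--         if tag:
--             result.append((" ".join(vals), tag))
--     return result
-- ===== Notes on version B (the rewrite author's own statement) =====
-- stated objective: alternative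
-- what changed: Replaces A's single-pass current_tag/current_value accumulator (with incremental ' '.join on every merge) by a two-phase run decomposition: scan each maximal run of equal tags, collect its non-empty values, and join them once per run.
import Mathlib
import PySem

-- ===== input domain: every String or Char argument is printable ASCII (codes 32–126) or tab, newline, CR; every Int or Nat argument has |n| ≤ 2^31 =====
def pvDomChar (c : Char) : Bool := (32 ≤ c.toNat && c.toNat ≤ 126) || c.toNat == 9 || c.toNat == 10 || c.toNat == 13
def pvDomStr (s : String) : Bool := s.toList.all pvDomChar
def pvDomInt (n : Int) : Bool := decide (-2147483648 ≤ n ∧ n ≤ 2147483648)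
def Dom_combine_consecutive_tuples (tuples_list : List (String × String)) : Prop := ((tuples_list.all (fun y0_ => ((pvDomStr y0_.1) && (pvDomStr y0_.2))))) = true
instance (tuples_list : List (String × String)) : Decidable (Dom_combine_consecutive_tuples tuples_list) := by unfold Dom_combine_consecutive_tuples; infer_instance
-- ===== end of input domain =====

-- B replaces A's current_tag/current_value accumulator loop by a two-phase run decomposition:
-- collect each maximal run of equal tags, join its non-empty values once, emit if the tag is non-empty (objective: alternative).

-- ===== PORT A =====
-- Python truthiness of current_tag/current_value (None or "" is falsy) is modelled with Option String.
def pvTruthyO : Option String → Bool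
  | none => false
  | some s => s ≠ ""

def pvLoopA : List (String × String) → List (String × String) → Option String → Option String → List (String × String)
  | [], cl, ctag, cval =>
      if pvTruthyO ctag then cl ++ [(cval.getD "", ctag.getD "")] else cl
  | (v, t) :: rest, cl, ctag, cval =>
      if some t ≠ ctag then
        pvLoopA rest (if pvTruthyO ctag then cl ++ [(cval.getD "", ctag.getD "")] else cl) (some t) (some v)
      else
        pvLoopA rest cl ctag (some (PySem.Str.join " " (([cval.getD "", v]).filter (fun s => s ≠ ""))))

def combine_consecutive_tuples (tuples_list : List (String × String)) : List (String × String) :=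
  pvLoopA tuples_list [] none none

-- ===== PORT B =====
-- inner while loop of Source B: collect the non-empty values of the run of tag `tag`, return them with the rest
def pvRunB (tag : String) : List (String × String) → List String × List (String × String)
  | [] => ([], [])
  | (v, t) :: rest =>
      if t = tag then
        let p := pvRunB tag rest
        ((if v ≠ "" then v :: p.1 else p.1), p.2)
      else ([], (v, t) :: rest)

-- termination lemma for the outer loop (cited by the port)
theorem pvRunB_len (tag : String) : ∀ (l : List (String × String)), (pvRunB tag l).2.length ≤ l.length := by
  intro l
  induction l with
  | nil => simp [pvRunB]
  | cons h rest ih =>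
      obtain ⟨v, t⟩ := h
      by_cases ht : t = tag <;> simp [pvRunB, ht] <;> try omega

def combine_consecutive_tuples_alt (tuples_list : List (String × String)) : List (String × String) :=
  match tuples_list with
  | [] => []
  | (v, t) :: rest =>
      let p := pvRunB t rest
      let vals := if v ≠ "" then v :: p.1 else p.1
      (if t ≠ "" then [(PySem.Str.join " " vals, t)] else []) ++ combine_consecutive_tuples_alt p.2
  termination_by tuples_list.length
  decreasing_by
    simp only [List.length_cons]
    exact Nat.lt_succ_of_le (pvRunB_len t rest)

-- ===== PRECONDITION & SPEC =====
def Spec_combine_consecutive_tuples (tuples_list : List (String × String)) (out : List (String × String)) : Prop := out = combine_consecutive_tuples_alt tuples_list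
instance (tuples_list : List (String × String)) (out : List (String × String)) : Decidable (Spec_combine_consecutive_tuples tuples_list out) := by unfold Spec_combine_consecutive_tuples; infer_instance

-- ===== CLAIM (what is proved, stated in full; the proofs are below) =====
def Claim_equal_combine_consecutive_tuples : Prop := ∀ (tuples_list : List (String × String)), Dom_combine_consecutive_tuples tuples_list → Spec_combine_consecutive_tuples tuples_list (combine_consecutive_tuples tuples_list)

-- ===== LEMMAS AND PROOFS =====

theorem pvStr_join_nil (sep : String) : PySem.Str.join sep [] = "" := by
  rw [← String.toList_inj]; simp [PySem.Str.toList_join, PySem.Chars.join_nil]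

theorem pvStr_join_singleton (sep v : String) : PySem.Str.join sep [v] = v := by
  rw [← String.toList_inj]; simp [PySem.Str.toList_join, PySem.Chars.join_singleton]

theorem pvAlt_nil : combine_consecutive_tuples_alt [] = [] := by
  rw [combine_consecutive_tuples_alt]

theorem pvAlt_cons (v t : String) (rest : List (String × String)) :
    combine_consecutive_tuples_alt ((v, t) :: rest) =
      (if t ≠ "" then
        [(PySem.Str.join " " (if v ≠ "" then v :: (pvRunB t rest).1 else (pvRunB t rest).1), t)]
       else []) ++ combine_consecutive_tuples_alt (pvRunB t rest).2 := by
  rw [combine_consecutive_tuples_alt]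

-- appending one more part to a non-empty join
theorem pvChars_join_append (sep : List Char) (y : List Char) :
    ∀ (xs : List (List Char)) (x : List Char),
      PySem.Chars.join sep (x :: xs ++ [y]) = PySem.Chars.join sep (x :: xs) ++ sep ++ y := by
  intro xs
  induction xs with
  | nil => intro x; simp [PySem.Chars.join_cons_cons, PySem.Chars.join_singleton]
  | cons z zs ih =>
      intro x
      have h2 := ih z
      simp only [List.cons_append] at h2 ⊢
      rw [PySem.Chars.join_cons_cons, h2, PySem.Chars.join_cons_cons]
      simp [List.append_assoc]

-- a join of parts whose head is non-empty is non-empty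
theorem pvChars_join_ne_nil (sep x : List Char) (xs : List (List Char)) (hx : x ≠ []) :
    PySem.Chars.join sep (x :: xs) ≠ [] := by
  cases xs with
  | nil => simpa [PySem.Chars.join_singleton] using hx
  | cons z zs => simp [PySem.Chars.join_cons_cons, hx]

-- A's incremental join step equals extending the collected-run join (all collected values non-empty)
theorem pvJoin_step (vs : List String) (v : String) (hvs : ∀ s ∈ vs, s ≠ "") :
    PySem.Str.join " " (([PySem.Str.join " " vs, v]).filter (fun s => s ≠ "")) =
      PySem.Str.join " " (vs ++ if v ≠ "" then [v] else []) := by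
  cases vs with
  | nil =>
      by_cases hv : v = "" <;> simp [hv, pvStr_join_nil, pvStr_join_singleton]
  | cons x xs =>
      have hxs : x ≠ "" := hvs x (by simp)
      have hx : x.toList ≠ [] := by
        intro h
        exact hxs (by rw [← String.toList_inj]; simpa using h)
      have hne : PySem.Str.join " " (x :: xs) ≠ "" := by
        intro h
        have h2 := congrArg String.toList h
        simp only [PySem.Str.toList_join, List.map_cons] at h2
        exact pvChars_join_ne_nil _ _ _ hx (by simpa using h2)
      by_cases hv : v = ""
      · simp [hv, hne, pvStr_join_singleton]
      · rw [← String.toList_inj]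
        simp only [hne, hv, PySem.Str.toList_join, List.filter,
          List.map_cons, List.map_append, List.map_nil, ne_eq,
          not_false_iff, if_true]
        simp [PySem.Chars.join_cons_cons, PySem.Chars.join_singleton]
        rw [show x.toList :: (List.map String.toList xs ++ [v.toList]) =
              (x.toList :: List.map String.toList xs) ++ [v.toList] from rfl,
            pvChars_join_append]
        simp [List.append_assoc]

-- main invariant: A's loop inside a run with tag t and collected non-empty values vs
theorem pvLoopA_run :
    ∀ (l : List (String × String)) (cl : List (String × String)) (t : String) (vs : List String),
      (∀ s ∈ vs, s ≠ "") →
      pvLoopA l cl (some t) (some (PySem.Str.join " " vs)) =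
        cl ++ ((if t ≠ "" then [(PySem.Str.join " " (vs ++ (pvRunB t l).1), t)] else [])
                 ++ combine_consecutive_tuples_alt (pvRunB t l).2) := by
  intro l
  induction l with
  | nil =>
      intro cl t vs hvs
      by_cases ht : t = "" <;>
        simp [pvLoopA, pvRunB, pvTruthyO, ht, pvAlt_nil]
  | cons h rest ih =>
      intro cl t vs hvs
      obtain ⟨v, t'⟩ := h
      by_cases hteq : t' = t
      · subst hteq
        have hvs' : ∀ s ∈ vs ++ (if v ≠ "" then [v] else []), s ≠ "" := by
          intro s hs
          rcases List.mem_append.1 hs with h1 | h2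
          · exact hvs s h1
          · by_cases hv : v = "" <;> simp [hv] at h2 <;> simp [h2, hv]
        simp only [pvLoopA, Option.getD_some]
        rw [if_neg (show ¬(some t' ≠ some t') by simp), pvJoin_step vs v hvs, ih cl t' _ hvs']
        by_cases hv : v = "" <;> by_cases ht : t' = "" <;>
          simp [pvRunB, hv, ht, List.append_assoc]
      · have hv' : some v = some (PySem.Str.join " " (if v ≠ "" then [v] else [])) := by
          by_cases hv : v = "" <;> simp [hv, pvStr_join_nil, pvStr_join_singleton]
        have hvs'' : ∀ s ∈ (if v ≠ "" then [v] else ([] : List String)), s ≠ "" := by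
          by_cases hv : v = "" <;> simp [hv]
        simp only [pvLoopA, pvTruthyO, Option.getD_some]
        rw [if_pos (show some t' ≠ some t by simp [hteq]), hv', ih _ t' _ hvs'']
        rw [show pvRunB t ((v, t') :: rest) = ([], (v, t') :: rest) by simp [pvRunB, hteq],
            pvAlt_cons]
        by_cases ht : t = ""
        · subst ht
          by_cases hv : v = "" <;> simp [hv, hteq]
        · by_cases hv : v = "" <;> by_cases ht' : t' = "" <;>
            simp [hv, ht, ht', List.append_assoc]

-- ===== VERDICT (by name: the statement is the Claim_ definition above) =====
theorem combine_consecutive_tuples_spec : Claim_equal_combine_consecutive_tuples := by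
  intro l _
  unfold Spec_combine_consecutive_tuples combine_consecutive_tuples
  cases l with
  | nil => simp [pvLoopA, pvTruthyO, pvAlt_nil]
  | cons h rest =>
      obtain ⟨v, t⟩ := h
      have hv' : some v = some (PySem.Str.join " " (if v ≠ "" then [v] else [])) := by
        by_cases hv : v = "" <;> simp [hv, pvStr_join_nil, pvStr_join_singleton]
      have hvs : ∀ s ∈ (if v ≠ "" then [v] else ([] : List String)), s ≠ "" := by
        by_cases hv : v = "" <;> simp [hv]
      simp only [pvLoopA, pvTruthyO, Option.getD_none]
      rw [if_pos (show some t ≠ none by simp), hv', pvLoopA_run rest _ t _ hvs, pvAlt_cons]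
      by_cases hv : v = "" <;> by_cases ht : t = "" <;> simp [hv, ht]
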